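-- pv_equiv track=rewrite | github.com/iamUmairMughal/CrossWord_Puzzle | crossword.py | get_all_possible_words
-- ===== SOURCE A (Python) =====
-- def get_all_possible_words(crossboard_words, all_strings):
--     possible_words = {}
--
--     for key, val in crossboard_words.items():
--         words = {}
--         for k, v in all_strings.items():
--             temp = []
--             for s in v:
--                 if len(s) == val.get('word_len') and s not in temp:
--                     temp.append(s)
--             if len(temp) > 0:
--                 words[k] = temp
--
--         possible_words[key] = words
--
--     return possible_words
-- ===== SOURCE B (Python) =====
-- def get_all_possible_words(crossboard_words, all_strings):
--     cache = {}
--     for val in crossboard_words.values():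
--         wl = val.get('word_len')
--         if wl not in cache:
--             words = {}
--             for k, v in all_strings.items():
--                 seen = dict.fromkeys(s for s in v if len(s) == wl)
--                 if seen:
--                     words[k] = list(seen)
--             cache[wl] = words
--     return {key: cache[val.get('word_len')] for key, val in crossboard_words.items()}
-- ===== Notes on version B (the rewrite author's own statement) =====
-- stated objective: faster
-- what changed: B computes the filtered word map once per distinct word_len via a cache and replaces A's quadratic in-list membership dedup by an ordered dict.fromkeys dedup.
import Mathlib
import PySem

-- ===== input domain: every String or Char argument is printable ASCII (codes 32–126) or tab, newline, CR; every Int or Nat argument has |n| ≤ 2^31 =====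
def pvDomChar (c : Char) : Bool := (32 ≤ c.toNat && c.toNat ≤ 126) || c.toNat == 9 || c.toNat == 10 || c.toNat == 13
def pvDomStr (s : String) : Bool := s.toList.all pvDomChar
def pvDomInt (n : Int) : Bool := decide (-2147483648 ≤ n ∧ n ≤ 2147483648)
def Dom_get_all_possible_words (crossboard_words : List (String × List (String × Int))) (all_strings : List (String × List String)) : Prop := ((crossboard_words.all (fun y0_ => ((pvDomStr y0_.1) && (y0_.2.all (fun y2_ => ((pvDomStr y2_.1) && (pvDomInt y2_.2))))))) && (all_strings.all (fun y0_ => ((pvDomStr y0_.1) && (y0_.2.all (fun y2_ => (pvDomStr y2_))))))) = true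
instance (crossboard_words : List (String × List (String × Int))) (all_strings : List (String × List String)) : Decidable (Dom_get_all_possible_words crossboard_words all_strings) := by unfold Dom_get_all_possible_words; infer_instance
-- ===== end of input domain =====

-- B builds the candidate map once per distinct word_len (cache) and dedups with dict.fromkeys instead of A's per-string membership scan.

-- shared Python-semantics helper: Python's `len(s) == val.get('word_len')` (int == Optional[int])
def pyEqIntOpt (a : Int) (b : Option Int) : Bool :=
  match b with
  | some n => a == n
  | none => false

-- ===== PORT A =====
def get_all_possible_words (crossboard_words : List (String × List (String × Int))) (all_strings : List (String × List String)) : List (String × List (String × List String)) :=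
  let possible_words :=
    crossboard_words.foldl (fun possible_words kv =>
      let key := kv.1
      let val := kv.2
      let words :=
        all_strings.foldl (fun (words : PySem.Dict String (List String)) (kv2 : String × List String) =>
          let k := kv2.1
          let v := kv2.2
          let temp :=
            v.foldl (fun temp s =>
              if pyEqIntOpt (PySem.Str.len s) (List.lookup "word_len" val) && !(temp.contains s)
              then temp ++ [s] else temp) ([] : List String)
          if temp.length > 0 then words.insert k temp else words)
          (PySem.Dict.empty : PySem.Dict String (List String))
      possible_words.insert key words.items)
      (PySem.Dict.empty : PySem.Dict String (List (String × List String)))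
  possible_words.items

-- ===== PORT B =====
-- helper for B: the `words` dict computed for one word_len value (the cached payload)
def altWordsFor (all_strings : List (String × List String)) (wl : Option Int) : List (String × List String) :=
  (all_strings.foldl (fun words kv =>
      let seen := PySem.List.dedup (kv.2.filter (fun s => pyEqIntOpt (PySem.Str.len s) wl))
      if seen.length > 0 then words.insert kv.1 seen else words)
    (PySem.Dict.empty : PySem.Dict String (List String))).items

def get_all_possible_words_alt (crossboard_words : List (String × List (String × Int))) (all_strings : List (String × List String)) : List (String × List (String × List String)) :=
  let cache :=
    crossboard_words.foldl (fun cache kv =>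
      let wl := List.lookup "word_len" kv.2
      if cache.contains wl then cache else cache.insert wl (altWordsFor all_strings wl))
      (PySem.Dict.empty : PySem.Dict (Option Int) (List (String × List String)))
  (crossboard_words.foldl (fun out kv =>
      out.insert kv.1 (cache.getD (List.lookup "word_len" kv.2) []))
    (PySem.Dict.empty : PySem.Dict String (List (String × List String)))).items

-- ===== PRECONDITION & SPEC =====
def Spec_get_all_possible_words (crossboard_words : List (String × List (String × Int))) (all_strings : List (String × List String)) (out : List (String × List (String × List String))) : Prop := out = get_all_possible_words_alt crossboard_words all_strings
instance (crossboard_words : List (String × List (String × Int))) (all_strings : List (String × List String)) (out : List (String × List (String × List String))) : Decidable (Spec_get_all_possible_words crossboard_words all_strings out) := by unfold Spec_get_all_possible_words; infer_instance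

-- ===== CLAIM (what is proved, stated in full; the proofs are below) =====
def Claim_equal_get_all_possible_words : Prop := ∀ (crossboard_words : List (String × List (String × Int))) (all_strings : List (String × List String)), Dom_get_all_possible_words crossboard_words all_strings → Spec_get_all_possible_words crossboard_words all_strings (get_all_possible_words crossboard_words all_strings)

-- ===== LEMMAS AND PROOFS =====

-- A's dedup-by-membership loop computes dedup of the filtered list
theorem temp_eq_dedup_filter (v : List String) (p : String → Bool) :
    v.foldl (fun temp s => if p s && !(temp.contains s) then temp ++ [s] else temp) ([] : List String)
      = PySem.List.dedup (v.filter p) := by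
  have h1 : PySem.List.dedup (v.filter p) = (v.filter p).foldl PySem.Set.add [] := by
    simp [PySem.List.dedup_eq_ofList, PySem.Set.ofList_eq_foldl]
  rw [h1, List.foldl_filter]
  apply PySem.List.foldl_congr_mem
  intro acc x _
  by_cases h : p x = true <;> simp [h, PySem.Set.add, PySem.Set.contains]

-- A's inner words dict for a slot equals the cached payload for its word_len
theorem wordsA_eq_altWordsFor (all_strings : List (String × List String)) (val : List (String × Int)) :
    (all_strings.foldl (fun (words : PySem.Dict String (List String)) (kv2 : String × List String) =>
        let temp :=
          kv2.2.foldl (fun temp s =>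
            if pyEqIntOpt (PySem.Str.len s) (List.lookup "word_len" val) && !(temp.contains s)
            then temp ++ [s] else temp) ([] : List String)
        if temp.length > 0 then words.insert kv2.1 temp else words)
      (PySem.Dict.empty : PySem.Dict String (List String))).items
      = altWordsFor all_strings (List.lookup "word_len" val) := by
  unfold altWordsFor
  congr 1
  apply PySem.List.foldl_congr_mem
  intro acc kv2 _
  simp only [temp_eq_dedup_filter]

-- one cache step notation
theorem cache_step_preserves_contains (all_strings : List (String × List String))
    (l : List (String × List (String × Int)))
    (cache : PySem.Dict (Option Int) (List (String × List String)))
    (wl0 : Option Int) (h : cache.contains wl0 = true) :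
    (l.foldl (fun cache kv =>
        let wl := List.lookup "word_len" kv.2
        if cache.contains wl then cache else cache.insert wl (altWordsFor all_strings wl)) cache).contains wl0 = true := by
  induction l generalizing cache with
  | nil => exact h
  | cons a t ih =>
    simp only [List.foldl_cons]
    apply ih
    by_cases hc : cache.contains (List.lookup "word_len" a.2) = true
    · simp [hc, h]
    · simp only [Bool.not_eq_true] at hc
      simp [hc, PySem.Dict.contains_insert, h]

-- the cache only ever stores altWordsFor payloads
theorem cache_inv (all_strings : List (String × List String)) (l : List (String × List (String × Int)))
    (cache : PySem.Dict (Option Int) (List (String × List String)))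
    (h : ∀ wl w, cache.get? wl = some w → w = altWordsFor all_strings wl) :
    ∀ wl w,
      (l.foldl (fun cache kv =>
          let wl := List.lookup "word_len" kv.2
          if cache.contains wl then cache else cache.insert wl (altWordsFor all_strings wl)) cache).get? wl = some w
      → w = altWordsFor all_strings wl := by
  induction l generalizing cache with
  | nil => exact h
  | cons a t ih =>
    simp only [List.foldl_cons]
    apply ih
    by_cases hc : cache.contains (List.lookup "word_len" a.2) = true
    · simpa [hc] using h
    · simp only [Bool.not_eq_true] at hc
      simp only [hc, if_neg, Bool.false_eq_true, not_false_iff]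
      intro wl w hw
      rw [PySem.Dict.get?_insert] at hw
      split at hw
      · next heq => cases hw; cases heq; rfl
      · exact h wl w hw

-- every word_len occurring in the processed list ends up in the cache
theorem cache_contains (all_strings : List (String × List String)) (l : List (String × List (String × Int)))
    (cache : PySem.Dict (Option Int) (List (String × List String))) :
    ∀ kv ∈ l,
      (l.foldl (fun cache kv =>
          let wl := List.lookup "word_len" kv.2
          if cache.contains wl then cache else cache.insert wl (altWordsFor all_strings wl)) cache).contains
        (List.lookup "word_len" kv.2) = true := by
  induction l generalizing cache with
  | nil => intro kv hkv; cases hkv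
  | cons a t ih =>
    intro kv hkv
    simp only [List.foldl_cons]
    rcases List.mem_cons.mp hkv with rfl | hmem
    · apply cache_step_preserves_contains
      by_cases hc : cache.contains (List.lookup "word_len" kv.2) = true
      · simp [hc]
      · simp only [Bool.not_eq_true] at hc
        simp [hc, PySem.Dict.contains_insert_self]
    · exact ih _ kv hmem

theorem cache_getD (all_strings : List (String × List String)) (l : List (String × List (String × Int))) :
    ∀ kv ∈ l,
      ((l.foldl (fun cache kv =>
          let wl := List.lookup "word_len" kv.2
          if cache.contains wl then cache else cache.insert wl (altWordsFor all_strings wl))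
        (PySem.Dict.empty : PySem.Dict (Option Int) (List (String × List String)))).getD
        (List.lookup "word_len" kv.2) []) = altWordsFor all_strings (List.lookup "word_len" kv.2) := by
  intro kv hkv
  have hc := cache_contains all_strings l PySem.Dict.empty kv hkv
  rw [PySem.Dict.contains_eq_isSome_get?] at hc
  rcases Option.isSome_iff_exists.mp hc with ⟨w, hw⟩
  have hval := cache_inv all_strings l PySem.Dict.empty
    (by intro wl w' h; simp [PySem.Dict.get?_empty] at h) _ _ hw
  rw [PySem.Dict.getD_eq_get?_getD]
  exact (congrArg (fun o => Option.getD o []) hw).trans hval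

-- ===== VERDICT (by name: the statement is the Claim_ definition above) =====
theorem get_all_possible_words_spec : Claim_equal_get_all_possible_words := by
  intro cw al _
  unfold Spec_get_all_possible_words get_all_possible_words get_all_possible_words_alt
  simp only []
  congr 1
  apply PySem.List.foldl_congr_mem
  intro acc kv hkv
  rw [wordsA_eq_altWordsFor, cache_getD al cw kv hkv]
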